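-- pv_equiv track=rewrite | github.com/pizzasteve111/TareaTDA | reduções.py | verificador_path
-- ===== SOURCE A (Python) =====
-- def verificador_path(grafo,caminos,solucion,k):
--     #solucion sería una lista de k listas que almacenan un camino c/u
--     if len(solucion)>k:
--         return False
--     #O(K^2 * V) siendo K la cantidad de caminos guardados y V los vertices que hay en cada camino(suponiendo que no hay una grandísima diferencia de tamaño)
--     for camino in solucion:
--         #habría que verificar que cada vértice del camino no se repita en los otros caminos
--         #En realidad, existe una solución con mejor complejidad, pero ya me encariñé de esta que hice
--         #Se podría ir recorriendo solo una vez e ir agregando los vértices recorridos a un set y listo te queda k*v con esa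
--         for v in camino:
--             for w in solucion:
--                 if w!=camino and v in w:
--                     return False
--     #Entonces, si cada v no se repite en ningún otro camino, tamos bien
--     return True
-- ===== SOURCE B (Python) =====
-- def verificador_path(grafo, caminos, solucion, k):
--     # One pass: remember for each vertex the content (tuple) of the first path
--     # containing it; fail as soon as a vertex reappears in a path with different content.
--     if len(solucion) > k:
--         return False
--     owner = {}
--     for camino in solucion:
--         sig = tuple(camino)
--         for v in camino:
--             s = owner.get(v)
--             if s is None:
--                 owner[v] = sig
--             elif s != sig:
--                 return False
--     return True
-- ===== Notes on version B (the rewrite author's own statement) =====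
-- stated objective: faster
-- what changed: Replaced the triple loop (for each path, each vertex, scan all other paths for membership) by a single pass that records in a dict the content of the first path containing each vertex and fails when a vertex reappears in a path of different content.
import Mathlib
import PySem

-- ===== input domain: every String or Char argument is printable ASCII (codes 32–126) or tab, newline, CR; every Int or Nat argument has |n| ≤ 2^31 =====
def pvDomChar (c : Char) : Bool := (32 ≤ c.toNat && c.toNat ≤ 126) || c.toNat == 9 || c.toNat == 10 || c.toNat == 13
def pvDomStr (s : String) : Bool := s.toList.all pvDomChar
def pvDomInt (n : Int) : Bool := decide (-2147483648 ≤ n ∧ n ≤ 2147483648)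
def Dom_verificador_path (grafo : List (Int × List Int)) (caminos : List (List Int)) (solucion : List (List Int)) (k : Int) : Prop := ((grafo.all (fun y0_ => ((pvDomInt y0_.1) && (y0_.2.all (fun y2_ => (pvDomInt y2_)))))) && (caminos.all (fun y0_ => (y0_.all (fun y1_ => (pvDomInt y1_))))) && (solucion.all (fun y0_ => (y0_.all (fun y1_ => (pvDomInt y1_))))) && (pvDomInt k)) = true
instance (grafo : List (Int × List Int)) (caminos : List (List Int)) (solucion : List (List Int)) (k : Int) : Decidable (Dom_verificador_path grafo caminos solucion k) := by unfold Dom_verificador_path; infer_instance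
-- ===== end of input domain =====

-- B replaces A's triple nested scan by a single pass with a dict from vertex to the
-- content of the first path containing it (objective: faster, asymptotic).

-- ===== PORT A =====
-- the triple early-return loop of A: all-quantified over the same iterations
def verificador_path (grafo : List (Int × List Int)) (caminos : List (List Int)) (solucion : List (List Int)) (k : Int) : Bool :=
  if (solucion.length : Int) > k then false
  else
    solucion.all (fun camino =>
      camino.all (fun v =>
        solucion.all (fun w => !(decide (w ≠ camino) && w.contains v))))

-- ===== PORT B =====
-- inner loop of Source B over the vertices of one path: none = early 'return False'
def vpInner (owner : PySem.Dict Int (List Int)) (sig : List Int) (vs : List Int) :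
    Option (PySem.Dict Int (List Int)) :=
  match vs with
  | [] => some owner
  | v :: rest =>
    match owner.get? v with
    | none => vpInner (owner.insert v sig) sig rest
    | some s => if s = sig then vpInner owner sig rest else none

-- outer loop of Source B over the paths of solucion
def vpLoop (owner : PySem.Dict Int (List Int)) (paths : List (List Int)) : Bool :=
  match paths with
  | [] => true
  | camino :: rest =>
    match vpInner owner camino camino with
    | none => false
    | some owner' => vpLoop owner' rest

def verificador_path_alt (grafo : List (Int × List Int)) (caminos : List (List Int)) (solucion : List (List Int)) (k : Int) : Bool :=
  if (solucion.length : Int) > k then false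
  else vpLoop PySem.Dict.empty solucion

-- ===== PRECONDITION & SPEC =====
def Spec_verificador_path (grafo : List (Int × List Int)) (caminos : List (List Int)) (solucion : List (List Int)) (k : Int) (out : Bool) : Prop := out = verificador_path_alt grafo caminos solucion k
instance (grafo : List (Int × List Int)) (caminos : List (List Int)) (solucion : List (List Int)) (k : Int) (out : Bool) : Decidable (Spec_verificador_path grafo caminos solucion k out) := by unfold Spec_verificador_path; infer_instance

-- ===== CLAIM (what is proved, stated in full; the proofs are below) =====
def Claim_equal_verificador_path : Prop := ∀ (grafo : List (Int × List Int)) (caminos : List (List Int)) (solucion : List (List Int)) (k : Int), Dom_verificador_path grafo caminos solucion k → Spec_verificador_path grafo caminos solucion k (verificador_path grafo caminos solucion k)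

-- ===== LEMMAS AND PROOFS =====

-- the common semantics: two paths of different content share a vertex
def vpConf (sol : List (List Int)) : Prop :=
  ∃ p q v, p ∈ sol ∧ q ∈ sol ∧ p ≠ q ∧ v ∈ p ∧ v ∈ q

theorem vpA_iff (sol : List (List Int)) :
    (sol.all (fun camino => camino.all (fun v =>
      sol.all (fun w => !(decide (w ≠ camino) && w.contains v)))) = true) ↔ ¬ vpConf sol := by
  constructor
  · rintro h ⟨p, q, v, hp, hq, hne, hvp, hvq⟩
    simp only [List.all_eq_true] at h
    have := h q hq v hvq p hp
    simp [hne, hvp] at this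
  · intro h
    simp only [List.all_eq_true]
    intro camino hc v hv w hw
    by_contra hcon
    simp at hcon
    exact h ⟨w, camino, v, hw, hc, hcon.1, hcon.2, hv⟩

theorem vpInner_none {owner : PySem.Dict Int (List Int)} {sig : List Int} {vs : List Int} :
    vpInner owner sig vs = none ↔ ∃ v ∈ vs, ∃ s, owner.get? v = some s ∧ s ≠ sig := by
  induction vs generalizing owner with
  | nil => simp [vpInner]
  | cons v rest ih =>
    simp only [vpInner]
    split
    · rename_i hg
      rw [ih]
      constructor
      · rintro ⟨u, hu, s, hs, hne⟩
        refine ⟨u, List.mem_cons_of_mem _ hu, s, ?_, hne⟩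
        rw [PySem.Dict.get?_insert] at hs
        split at hs
        · exact absurd (Option.some.inj hs).symm hne
        · exact hs
      · rintro ⟨u, hu, s, hs, hne⟩
        rcases List.mem_cons.mp hu with rfl | hu
        · rw [hg] at hs; exact absurd hs (by simp)
        · refine ⟨u, hu, s, ?_, hne⟩
          rw [PySem.Dict.get?_insert]
          split
          · rename_i heq; subst heq; rw [hg] at hs; exact absurd hs (by simp)
          · exact hs
    · rename_i s hg
      split
      · rename_i hss
        rw [ih]
        constructor
        · rintro ⟨u, hu, t, ht, hne⟩
          exact ⟨u, List.mem_cons_of_mem _ hu, t, ht, hne⟩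
        · rintro ⟨u, hu, t, ht, hne⟩
          rcases List.mem_cons.mp hu with rfl | hu
          · rw [hg] at ht
            exact absurd ((Option.some.inj ht) ▸ hss) hne
          · exact ⟨u, hu, t, ht, hne⟩
      · rename_i hss
        simp only [true_iff]
        exact ⟨v, List.mem_cons_self .., s, hg, hss⟩

theorem vpInner_some {owner owner' : PySem.Dict Int (List Int)} {sig : List Int} {vs : List Int}
    (h : vpInner owner sig vs = some owner') :
    (∀ v s, owner.get? v = some s → owner'.get? v = some s) ∧
    (∀ v ∈ vs, owner'.get? v = some sig) ∧
    (∀ v s, owner'.get? v = some s → owner.get? v = some s ∨ (v ∈ vs ∧ s = sig)) := by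
  induction vs generalizing owner with
  | nil =>
    simp only [vpInner, Option.some.injEq] at h
    subst h
    exact ⟨fun _ _ h => h, by simp, fun v s h => Or.inl h⟩
  | cons v rest ih =>
    simp only [vpInner] at h
    split at h
    · rename_i hg
      obtain ⟨ha, hb, hc⟩ := ih h
      refine ⟨?_, ?_, ?_⟩
      · intro u s hs
        apply ha
        rw [PySem.Dict.get?_insert]
        split
        · rename_i heq; subst heq; rw [hg] at hs; exact absurd hs (by simp)
        · exact hs
      · intro u hu
        rcases List.mem_cons.mp hu with rfl | hu
        · exact ha u sig (by rw [PySem.Dict.get?_insert, if_pos rfl])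
        · exact hb u hu
      · intro u s hs
        rcases hc u s hs with hold | ⟨hu, rfl⟩
        · rw [PySem.Dict.get?_insert] at hold
          split at hold
          · rename_i heq; subst heq
            exact Or.inr ⟨List.mem_cons_self .., (Option.some.inj hold).symm⟩
          · exact Or.inl hold
        · exact Or.inr ⟨List.mem_cons_of_mem _ hu, rfl⟩
    · rename_i s hg
      split at h
      · rename_i hss
        subst hss
        obtain ⟨ha, hb, hc⟩ := ih h
        refine ⟨ha, ?_, ?_⟩
        · intro u hu
          rcases List.mem_cons.mp hu with rfl | hu
          · exact ha u s hg
          · exact hb u hu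
        · intro u t ht
          rcases hc u t ht with hold | ⟨hu, rfl⟩
          · exact Or.inl hold
          · exact Or.inr ⟨List.mem_cons_of_mem _ hu, rfl⟩
      · cases h

theorem vpLoop_iff (rest processed : List (List Int)) (owner : PySem.Dict Int (List Int))
    (H1 : ∀ v s, owner.get? v = some s → v ∈ s ∧ s ∈ processed)
    (H2 : ∀ p ∈ processed, ∀ v ∈ p, owner.get? v = some p) :
    vpLoop owner rest = true ↔ ¬ vpConf (processed ++ rest) := by
  induction rest generalizing owner processed with
  | nil =>
    simp only [vpLoop, List.append_nil, true_iff]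
    rintro ⟨p, q, v, hp, hq, hne, hvp, hvq⟩
    have h1 := H2 p hp v hvp
    have h2 := H2 q hq v hvq
    rw [h1] at h2
    exact hne (Option.some.inj h2)
  | cons camino rest ih =>
    simp only [vpLoop]
    split
    · rename_i h
      simp only [Bool.false_eq_true, false_iff, not_not]
      obtain ⟨v, hv, s, hs, hne⟩ := vpInner_none.mp h
      obtain ⟨hvs, hsp⟩ := H1 v s hs
      exact ⟨s, camino, v, List.mem_append_left _ hsp,
        List.mem_append_right _ (List.mem_cons_self ..), hne, hvs, hv⟩
    · rename_i owner' h
      obtain ⟨ha, hb, hc⟩ := vpInner_some h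
      have := ih (processed ++ [camino]) owner'
        (by
          intro v s hs
          rcases hc v s hs with hold | ⟨hv, rfl⟩
          · obtain ⟨h1, h2⟩ := H1 v s hold
            exact ⟨h1, List.mem_append_left _ h2⟩
          · exact ⟨hv, List.mem_append_right _ (List.mem_singleton.mpr rfl)⟩)
        (by
          intro p hp v hv
          rcases List.mem_append.mp hp with hp | hp
          · exact ha v p (H2 p hp v hv)
          · rw [List.mem_singleton.mp hp] at hv ⊢
            exact hb v hv)
      rwa [List.append_assoc, List.singleton_append] at this

theorem vpAlt_iff (sol : List (List Int)) :
    vpLoop PySem.Dict.empty sol = true ↔ ¬ vpConf sol := by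
  have := vpLoop_iff sol [] PySem.Dict.empty
    (by intro v s hs; rw [PySem.Dict.get?_empty] at hs; exact absurd hs (by simp))
    (by intro p hp; exact absurd hp (by simp))
  simpa using this

-- ===== VERDICT (by name: the statement is the Claim_ definition above) =====
theorem verificador_path_spec : Claim_equal_verificador_path := by
  intro grafo caminos solucion k _
  unfold Spec_verificador_path verificador_path verificador_path_alt
  by_cases hk : (solucion.length : Int) > k
  · rw [if_pos hk, if_pos hk]
  · rw [if_neg hk, if_neg hk]
    exact Bool.eq_iff_iff.mpr ((vpA_iff solucion).trans (vpAlt_iff solucion).symm)
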